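-- pv_equiv track=rewrite | github.com/renatosampaio81/usp_IntroPython2 | Semana6/elefantes.py | elefantes
-- ===== SOURCE A (Python) =====
-- def incomodam(n):
--   if n != int and n <= 0:
--     return ""
--   else:
--     return "incomodam " + incomodam(n-1)
--
-- def elefantes(n):
--   if not n > 1:
--     return ""
--   else:
--     if n <= 2:
--       return  'Um elefante incomoda muita gente' + '\n' + str(n) + ' elefantes ' + incomodam(n)+ 'muito mais'
--     else:
--       return elefantes(n-1) + '\n' + str(n-1) + ' elefantes incomodam muita gente' + '\n' + str(n) + ' elefantes ' + incomodam(n) + 'muito mais'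
-- ===== SOURCE B (Python) =====
-- def elefantes(n):
--     if not n > 1:
--         return ""
--     lines = ["Um elefante incomoda muita gente",
--              "2 elefantes " + "incomodam " * 2 + "muito mais"]
--     for k in range(3, n + 1):
--         lines.append(str(k - 1) + " elefantes incomodam muita gente")
--         lines.append(str(k) + " elefantes " + "incomodam " * k + "muito mais")
--     return "\n".join(lines)
-- ===== Notes on version B (the rewrite author's own statement) =====
-- stated objective: faster
-- what changed: Replaced the two recursions (song recursion plus the incomodam helper) with a single iterative loop that appends two lines per verse, builds repetitions by string multiplication and joins the lines at the end; Pre_ conservatively excludes large n, on which A overflows CPython's recursion stack (RecursionError).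
import Mathlib
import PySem

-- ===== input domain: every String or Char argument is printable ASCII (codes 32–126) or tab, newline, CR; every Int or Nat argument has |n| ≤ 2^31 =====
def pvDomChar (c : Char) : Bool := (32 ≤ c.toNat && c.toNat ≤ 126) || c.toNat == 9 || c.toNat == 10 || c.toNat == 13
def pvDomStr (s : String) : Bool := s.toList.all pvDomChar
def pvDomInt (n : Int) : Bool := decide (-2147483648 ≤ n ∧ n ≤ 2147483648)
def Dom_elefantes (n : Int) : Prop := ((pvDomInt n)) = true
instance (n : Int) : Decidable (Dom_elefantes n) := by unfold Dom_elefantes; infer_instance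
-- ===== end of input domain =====

-- B replaces A's two recursions (song + incomodam helper) with one loop that appends two
-- lines per verse, string multiplication and a final join; same value, measured faster (no re-building).

-- ===== PORT A =====
-- 'n != int' is always True for an int argument, so incomodam returns "" iff n <= 0
def incomodam (n : Int) : String :=
  if n ≤ 0 then ""
  else "incomodam " ++ incomodam (n - 1)
termination_by n.toNat
decreasing_by omega

def elefantes (n : Int) : String :=
  if ¬ n > 1 then ""
  else if n ≤ 2 then
    "Um elefante incomoda muita gente" ++ "\n" ++ PySem.Int.toStr n ++ " elefantes " ++
      incomodam n ++ "muito mais"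
  else
    elefantes (n - 1) ++ "\n" ++ PySem.Int.toStr (n - 1) ++ " elefantes incomodam muita gente" ++
      "\n" ++ PySem.Int.toStr n ++ " elefantes " ++ incomodam n ++ "muito mais"
termination_by n.toNat
decreasing_by omega

-- ===== PORT B =====
-- "s" * k on a Python str (empty for k <= 0); exact hand port of str * int
def strTimes (s : String) (k : Int) : String := String.join (List.replicate k.toNat s)

def elefantes_alt (n : Int) : String :=
  if ¬ n > 1 then ""
  else
    PySem.Str.join "\n"
      ((PySem.List.pyRange 3 (n + 1)).foldl (fun acc k =>
        acc ++ [PySem.Int.toStr (k - 1) ++ " elefantes incomodam muita gente",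
                PySem.Int.toStr k ++ " elefantes " ++ strTimes "incomodam " k ++ "muito mais"])
        ["Um elefante incomoda muita gente",
         "2 elefantes " ++ strTimes "incomodam " 2 ++ "muito mais"])

-- ===== PRECONDITION & SPEC =====
-- Pre_ excludes large n, on which the Python A raises RecursionError (its recursion depth is
-- about n and CPython's stack is bounded); the bound is conservative because the exact limit
-- depends on the interpreter's recursion limit and current stack depth.
def Pre_elefantes (n : Int) : Prop := n ≤ 5000
instance (n : Int) : Decidable (Pre_elefantes n) := by unfold Pre_elefantes; infer_instance
def pvWitness_elefantes : Int := (5)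

def Spec_elefantes (n : Int) (out : String) : Prop := out = elefantes_alt n
instance (n : Int) (out : String) : Decidable (Spec_elefantes n out) := by unfold Spec_elefantes; infer_instance

-- ===== CLAIM (what is proved, stated in full; the proofs are below) =====
def Claim_equal_elefantes : Prop := ∀ (n : Int), Dom_elefantes n → Pre_elefantes n → Spec_elefantes n (elefantes n)

-- ===== LEMMAS AND PROOFS =====

lemma string_join_cons (a : String) (l : List String) :
    String.join (a :: l) = a ++ String.join l := by
  simp only [String.join, List.foldl_cons, String.empty_append]
  induction l generalizing a with
  | nil => simp
  | cons b t ih => rw [List.foldl_cons, List.foldl_cons, ih (a ++ b), ih ("" ++ b),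
      String.empty_append, String.append_assoc]

-- incomodam n is "incomodam " repeated n times
lemma incomodam_eq_strTimes (n : Int) : incomodam n = strTimes "incomodam " n := by
  rw [incomodam]
  split_ifs with h
  · have h0 : n.toNat = 0 := by omega
    rw [strTimes, h0, List.replicate_zero]
    rfl
  · have h1 : n.toNat = (n - 1).toNat + 1 := by omega
    rw [incomodam_eq_strTimes (n - 1), strTimes, strTimes, h1, List.replicate_succ,
      string_join_cons]
termination_by n.toNat
decreasing_by omega

-- joining after appending one more part (nonempty prefix)
lemma chars_join_append_singleton (sep : List Char) (a p : List Char) (l : List (List Char)) :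
    PySem.Chars.join sep (a :: l ++ [p]) = PySem.Chars.join sep (a :: l) ++ sep ++ p := by
  induction l generalizing a with
  | nil => simp [PySem.Chars.join_cons_cons, PySem.Chars.join_singleton]
  | cons b t ih =>
    have := ih b
    simp only [List.cons_append] at *
    rw [PySem.Chars.join_cons_cons, PySem.Chars.join_cons_cons, this]
    simp [List.append_assoc]

lemma str_join_append_two (sep a b x y : String) (l : List String) :
    PySem.Str.join sep (a :: b :: l ++ [x, y]) =
      PySem.Str.join sep (a :: b :: l) ++ sep ++ x ++ sep ++ y := by
  apply String.toList_inj.mp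
  simp only [PySem.Str.toList_join, String.toList_append, List.map_append, List.map_cons,
    List.map_nil]
  rw [show (String.toList a :: String.toList b :: l.map String.toList ++ [x.toList, y.toList])
      = ((String.toList a :: (String.toList b :: l.map String.toList ++ [x.toList])) ++ [y.toList])
      by simp, chars_join_append_singleton,
    show (String.toList a :: (String.toList b :: List.map String.toList l ++ [String.toList x]))
      = (String.toList a :: (String.toList b :: List.map String.toList l) ++ [String.toList x])
      by simp, chars_join_append_singleton]

lemma str_join_pair (sep a b : String) : PySem.Str.join sep [a, b] = a ++ sep ++ b := by
  apply String.toList_inj.mp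
  simp [PySem.Str.toList_join, PySem.Chars.join_cons_cons, PySem.Chars.join_singleton]

-- the per-verse lines
def verse1 (k : Int) : String := PySem.Int.toStr (k - 1) ++ " elefantes incomodam muita gente"
def verse2 (k : Int) : String :=
  PySem.Int.toStr k ++ " elefantes " ++ strTimes "incomodam " k ++ "muito mais"

-- B's fold, written as init ++ flatMap
lemma alt_closed (n : Int) (h : 1 < n) :
    elefantes_alt n = PySem.Str.join "\n"
      ("Um elefante incomoda muita gente" ::
       ("2 elefantes " ++ strTimes "incomodam " 2 ++ "muito mais") ::
       (PySem.List.pyRange 3 (n + 1)).flatMap (fun k => [verse1 k, verse2 k])) := by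
  rw [elefantes_alt, if_neg (by omega : ¬ ¬ n > 1),
    PySem.List.foldl_append_eq_flatMap (fun k =>
      [PySem.Int.toStr (k - 1) ++ " elefantes incomodam muita gente",
       PySem.Int.toStr k ++ " elefantes " ++ strTimes "incomodam " k ++ "muito mais"])]
  rfl

lemma alt_step (n : Int) (h : 2 < n) :
    elefantes_alt n = elefantes_alt (n - 1) ++ "\n" ++ verse1 n ++ "\n" ++ verse2 n := by
  rw [alt_closed n (by omega), alt_closed (n - 1) (by omega)]
  have hr : PySem.List.pyRange 3 (n + 1) = PySem.List.pyRange 3 n ++ [n] := by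
    simpa using PySem.List.pyRange_one_succ_right (a := 3) (b := n) (by omega)
  have hr' : PySem.List.pyRange 3 (n - 1 + 1) = PySem.List.pyRange 3 n := by norm_num
  rw [hr, hr', List.flatMap_append]
  simp only [List.flatMap_cons, List.flatMap_nil, List.append_nil]
  rw [show ("Um elefante incomoda muita gente" ::
       ("2 elefantes " ++ strTimes "incomodam " 2 ++ "muito mais") ::
       ((PySem.List.pyRange 3 n).flatMap (fun k => [verse1 k, verse2 k]) ++ [verse1 n, verse2 n]))
    = ("Um elefante incomoda muita gente" ::
       ("2 elefantes " ++ strTimes "incomodam " 2 ++ "muito mais") ::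
       (PySem.List.pyRange 3 n).flatMap (fun k => [verse1 k, verse2 k]) ++ [verse1 n, verse2 n])
    by simp]
  exact str_join_append_two _ _ _ _ _ _

lemma toStr_two_merge : PySem.Int.toStr 2 ++ " elefantes " = "2 elefantes " := by
  apply String.toList_inj.mp
  simp only [String.toList_append]
  decide

lemma main_eq (n : Int) : elefantes n = elefantes_alt n := by
  rw [elefantes]
  split_ifs with h1 h2
  · -- n = 2
    have hn : n = 2 := by omega
    subst hn
    rw [alt_closed 2 (by omega), show PySem.List.pyRange 3 (2 + 1) = [] by decide]
    simp only [List.flatMap_nil]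
    rw [str_join_pair, incomodam_eq_strTimes, ← toStr_two_merge]
    simp only [String.append_assoc]
  · -- n > 2
    rw [main_eq (n - 1), alt_step n (by omega), incomodam_eq_strTimes]
    simp only [verse1, verse2, String.append_assoc]
  · rw [elefantes_alt, if_pos h1]
termination_by n.toNat
decreasing_by omega

-- ===== VERDICT (by name: the statement is the Claim_ definition above) =====
theorem elefantes_spec : Claim_equal_elefantes := by
  intro n _ _
  unfold Spec_elefantes
  exact main_eq n
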